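-- pv_equiv track=rewrite | github.com/darthkolli145/Mazegame | sample_algorithm.py | find_any_valid_move
-- ===== SOURCE A (Python) =====
-- def find_any_valid_move(maze, start_pos):
--     """
--     Find any valid move if no good frontier is found.
--     Checks each adjacent cell in the maze matrix to find valid moves.
--     """
--     x, y = start_pos
--
--     # Prioritize powerups if they're adjacent
--     for dx, dy in [(0, 1), (1, 0), (0, -1), (-1, 0)]:
--         nx, ny = x + dx, y + dy
--         if is_valid_move(maze, (nx, ny)):
--             # Check if this cell contains a powerup (values 4-11)
--             if 4 <= maze[ny][nx] <= 11:
--                 return [start_pos, (nx, ny)]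
--
--     # Try all four directions in a priority order
--     for dx, dy in [(0, 1), (1, 0), (0, -1), (-1, 0)]:
--         nx, ny = x + dx, y + dy
--         if is_valid_move(maze, (nx, ny)):
--             return [start_pos, (nx, ny)]
--
--     # No valid moves, stay in place
--     return [start_pos]
--
-- def is_valid_move(maze, pos):
--     """
--     Check if a position is a valid move (in bounds and not a wall).
--
--     This is the key function that accesses the maze matrix to determine
--     if a cell is passable. All values except 1 (wall) are considered passable:
--     - 0: Regular path
--     - 2: Start position
--     - 3: Goal position
--     - 4-11: Various powerups
--     """
--     x, y = pos
--     height = len(maze)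
--     width = len(maze[0]) if height > 0 else 0
--
--     if not (0 <= x < width and 0 <= y < height):
--         return False
--
--     # Check maze value - only walls (value 1) are impassable
--     return maze[y][x] != 1
-- ===== SOURCE B (Python) =====
-- def find_any_valid_move(maze, start_pos):
--     """Single pass over the four directions, recording the first valid move
--     and the first valid powerup move; powerup wins."""
--     x, y = start_pos
--     height = len(maze)
--     width = len(maze[0]) if height > 0 else 0
--     first_valid = None
--     first_powerup = None
--     for dx, dy in ((0, 1), (1, 0), (0, -1), (-1, 0)):
--         nx, ny = x + dx, y + dy
--         if 0 <= nx < width and 0 <= ny < height: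
--             cell = maze[ny][nx]
--             if cell != 1:
--                 if first_valid is None:
--                     first_valid = (nx, ny)
--                 if first_powerup is None and 4 <= cell <= 11:
--                     first_powerup = (nx, ny)
--     if first_powerup is not None:
--         return [start_pos, first_powerup]
--     if first_valid is not None:
--         return [start_pos, first_valid]
--     return [start_pos]
-- ===== Notes on version B (the rewrite author's own statement) =====
-- stated objective: simpler
-- what changed: Replaces A's two sequential early-return scans over the four directions (the second re-validating every cell) with one pass that records the first valid move and the first valid powerup move, then picks the powerup if present.
-- outside the precondition, e.g. on find_any_valid_move([[0, 0], [0], [0, 0], [0, 4]], (1, 2)): A returns [(1, 2), (1, 3)], B raises IndexError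
import Mathlib
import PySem

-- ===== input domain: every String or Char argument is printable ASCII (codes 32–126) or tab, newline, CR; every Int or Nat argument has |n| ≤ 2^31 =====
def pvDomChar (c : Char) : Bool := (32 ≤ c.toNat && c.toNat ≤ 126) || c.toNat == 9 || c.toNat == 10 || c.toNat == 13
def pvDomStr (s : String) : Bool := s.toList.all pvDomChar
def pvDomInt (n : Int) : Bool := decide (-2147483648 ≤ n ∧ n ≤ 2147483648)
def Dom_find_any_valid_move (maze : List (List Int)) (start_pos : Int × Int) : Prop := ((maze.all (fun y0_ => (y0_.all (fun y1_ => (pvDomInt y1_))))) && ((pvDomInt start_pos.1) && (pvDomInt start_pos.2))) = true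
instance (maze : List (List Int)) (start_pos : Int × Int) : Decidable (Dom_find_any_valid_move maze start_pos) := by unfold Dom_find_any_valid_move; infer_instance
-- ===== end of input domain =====

-- B replaces A's two early-return scans over the four directions with one pass recording the
-- first valid move and the first valid powerup move (objective: simpler).

-- shared by both ports: width = len(maze[0]) if len(maze) > 0 else 0
def pvWidth (maze : List (List Int)) : Int :=
  match maze with
  | [] => 0
  | r :: _ => (r.length : Int)

-- shared by both ports: maze[ny][nx]; pyGetD is exact here because Pre_ keeps the index in range
def pvCell (maze : List (List Int)) (ny nx : Int) : Int :=
  PySem.List.pyGetD (PySem.List.pyGetD maze ny []) nx 0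

def pvDirs : List (Int × Int) := [(0, 1), (1, 0), (0, -1), (-1, 0)]

-- ===== PORT A =====
def is_valid_move (maze : List (List Int)) (pos : Int × Int) : Bool :=
  let x := pos.1
  let y := pos.2
  let height : Int := (maze.length : Int)
  let width : Int := pvWidth maze
  if 0 ≤ x ∧ x < width ∧ 0 ≤ y ∧ y < height then
    pvCell maze y x != 1       -- maze[y][x] != 1 (IndexError on a short row is outside Pre_)
  else false

-- first loop of A: return the first valid adjacent cell holding a powerup (4..11)
def pvPowerupLoop (maze : List (List Int)) (x y : Int) : List (Int × Int) → Option (Int × Int)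
  | [] => none
  | d :: rest =>
    let nx := x + d.1
    let ny := y + d.2
    if is_valid_move maze (nx, ny) then
      if 4 ≤ pvCell maze ny nx ∧ pvCell maze ny nx ≤ 11 then some (nx, ny)
      else pvPowerupLoop maze x y rest
    else pvPowerupLoop maze x y rest

-- second loop of A: return the first valid adjacent cell
def pvValidLoop (maze : List (List Int)) (x y : Int) : List (Int × Int) → Option (Int × Int)
  | [] => none
  | d :: rest =>
    let nx := x + d.1
    let ny := y + d.2
    if is_valid_move maze (nx, ny) then some (nx, ny)
    else pvValidLoop maze x y rest

def find_any_valid_move (maze : List (List Int)) (start_pos : Int × Int) : List (Int × Int) :=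
  let x := start_pos.1
  let y := start_pos.2
  match pvPowerupLoop maze x y pvDirs with
  | some p => [start_pos, p]
  | none =>
    match pvValidLoop maze x y pvDirs with
    | some p => [start_pos, p]
    | none => [start_pos]

-- ===== PORT B =====
-- one step of B's single pass: state = (first_valid, first_powerup)
def pvStep (maze : List (List Int)) (width height x y : Int)
    (st : Option (Int × Int) × Option (Int × Int)) (d : Int × Int) :
    Option (Int × Int) × Option (Int × Int) :=
  let nx := x + d.1
  let ny := y + d.2
  if 0 ≤ nx ∧ nx < width ∧ 0 ≤ ny ∧ ny < height then
    let cell := pvCell maze ny nx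
    if cell ≠ 1 then
      (if st.1 = none then some (nx, ny) else st.1,
       if st.2 = none ∧ 4 ≤ cell ∧ cell ≤ 11 then some (nx, ny) else st.2)
    else st
  else st

def find_any_valid_move_alt (maze : List (List Int)) (start_pos : Int × Int) : List (Int × Int) :=
  let x := start_pos.1
  let y := start_pos.2
  let height : Int := (maze.length : Int)
  let width : Int := pvWidth maze
  let st := pvDirs.foldl (pvStep maze width height x y) (none, none)
  match st.2 with
  | some p => [start_pos, p]
  | none =>
    match st.1 with
    | some p => [start_pos, p]
    | none => [start_pos]

-- ===== PRECONDITION & SPEC =====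
-- Pre_ excludes the inputs on which Python raises IndexError: an adjacent cell that is inside
-- the width-of-row-0 × height bounding box but beyond the end of its own (shorter, ragged) row.
def Pre_find_any_valid_move (maze : List (List Int)) (start_pos : Int × Int) : Prop :=
  ∀ d ∈ pvDirs,
    (0 ≤ start_pos.1 + d.1 ∧ start_pos.1 + d.1 < pvWidth maze ∧
     0 ≤ start_pos.2 + d.2 ∧ start_pos.2 + d.2 < (maze.length : Int)) →
      start_pos.1 + d.1 < ((PySem.List.pyGetD maze (start_pos.2 + d.2) []).length : Int)

instance (maze : List (List Int)) (start_pos : Int × Int) : Decidable (Pre_find_any_valid_move maze start_pos) := by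
  unfold Pre_find_any_valid_move; infer_instance

def pvWitness_find_any_valid_move : List (List Int) × (Int × Int) := ([[0, 4], [1, 0]], (0, 0))

def Spec_find_any_valid_move (maze : List (List Int)) (start_pos : Int × Int) (out : List (Int × Int)) : Prop := out = find_any_valid_move_alt maze start_pos
instance (maze : List (List Int)) (start_pos : Int × Int) (out : List (Int × Int)) : Decidable (Spec_find_any_valid_move maze start_pos out) := by unfold Spec_find_any_valid_move; infer_instance

-- ===== CLAIM (what is proved, stated in full; the proofs are below) =====
def Claim_equal_find_any_valid_move : Prop := ∀ (maze : List (List Int)) (start_pos : Int × Int), Dom_find_any_valid_move maze start_pos → Pre_find_any_valid_move maze start_pos → Spec_find_any_valid_move maze start_pos (find_any_valid_move maze start_pos)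

-- ===== LEMMAS AND PROOFS =====

theorem pvWitness_ok :
    Dom_find_any_valid_move pvWitness_find_any_valid_move.1 pvWitness_find_any_valid_move.2 ∧
    Pre_find_any_valid_move pvWitness_find_any_valid_move.1 pvWitness_find_any_valid_move.2 := by
  decide

-- B's bounds-and-wall test coincides with A's is_valid_move
theorem step_valid_eq (maze : List (List Int)) (nx ny : Int) :
    is_valid_move maze (nx, ny) =
      ((decide (0 ≤ nx ∧ nx < pvWidth maze ∧ 0 ≤ ny ∧ ny < (maze.length : Int))) &&
        (pvCell maze ny nx != 1)) := by
  unfold is_valid_move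
  by_cases h : 0 ≤ nx ∧ nx < pvWidth maze ∧ 0 ≤ ny ∧ ny < (maze.length : Int) <;> simp [h]

-- B's fold over any direction list computes (A's second loop, A's first loop), threaded
-- through the already-recorded state via Option.orElse
theorem foldl_split (maze : List (List Int)) (x y : Int) (ds : List (Int × Int))
    (fv fp : Option (Int × Int)) :
    List.foldl (pvStep maze (pvWidth maze) (maze.length : Int) x y) (fv, fp) ds =
      (fv.orElse (fun _ => pvValidLoop maze x y ds),
       fp.orElse (fun _ => pvPowerupLoop maze x y ds)) := by
  induction ds generalizing fv fp with
  | nil => cases fv <;> cases fp <;> simp [pvValidLoop, pvPowerupLoop, Option.orElse]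
  | cons d rest ih =>
    simp only [List.foldl, pvStep, pvValidLoop, pvPowerupLoop, step_valid_eq maze (x + d.1) (y + d.2)]
    by_cases hb : 0 ≤ x + d.1 ∧ x + d.1 < pvWidth maze ∧ 0 ≤ y + d.2 ∧ y + d.2 < (maze.length : Int)
    · by_cases hc : pvCell maze (y + d.2) (x + d.1) = 1
      · simp [hb, hc, ih]
      · have ht : (pvCell maze (y + d.2) (x + d.1) != 1) = true := by simp [hc]
        by_cases hpu : 4 ≤ pvCell maze (y + d.2) (x + d.1) ∧ pvCell maze (y + d.2) (x + d.1) ≤ 11 <;>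
          simp only [hb, hpu, ht, decide_true, Bool.and_true, if_true, ih, and_self,
            and_false, if_false] <;>
          cases fv <;> cases fp <;> simp [Option.orElse, hc]
    · simp [hb, ih]

-- ===== VERDICT (by name: the statement is the Claim_ definition above) =====
theorem find_any_valid_move_spec : Claim_equal_find_any_valid_move := by
  intro maze start_pos _ _
  unfold Spec_find_any_valid_move find_any_valid_move find_any_valid_move_alt
  simp only [foldl_split]
  cases hP : pvPowerupLoop maze start_pos.1 start_pos.2 pvDirs <;>
    cases hV : pvValidLoop maze start_pos.1 start_pos.2 pvDirs <;>
      simp [Option.orElse]
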